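-- pv_equiv track=rewrite | github.com/whyvineet/cp-solutions | Codeforces/1472D. Even-Odd Game/Solution.py | solve
-- ===== SOURCE A (Python) =====
-- def solve(n, a):
--
--     a.sort(reverse=True)
--
--     winner = 0
--     for i in range(n):
--         if a[i] % 2 ==  0 and i % 2 == 0:
--             winner += a[i]
--         elif a[i] % 2 == 1 and i % 2 == 1:
--             winner -= a[i]
--
--     if winner > 0:
--         return "Alice"
--     elif winner < 0:
--         return "Bob"
--
--     return "Tie"
-- ===== SOURCE B (Python) =====
-- def solve(n, a):
--     pool = list(a)
--     alice = 0
--     bob = 0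
--     alice_turn = True
--     for _ in range(n):
--         x = max(pool)
--         pool.remove(x)
--         if alice_turn:
--             if x % 2 == 0:
--                 alice += x
--         else:
--             if x % 2 == 1:
--                 bob += x
--         alice_turn = not alice_turn
--     if alice > bob:
--         return "Alice"
--     if alice < bob:
--         return "Bob"
--     return "Tie"
-- ===== Notes on version B (the rewrite author's own statement) =====
-- stated objective: alternative
-- what changed: Instead of sorting descending and scanning with index-parity tests into one signed accumulator, B never sorts: it simulates the game turn by turn, each turn extracting the maximum from a pool (max + remove) with a toggling turn flag, accumulating Alice's even picks and Bob's odd picks and comparing them. B does not mutate the argument list (A sorts it in place); the equivalence is about the return value.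
import Mathlib
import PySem

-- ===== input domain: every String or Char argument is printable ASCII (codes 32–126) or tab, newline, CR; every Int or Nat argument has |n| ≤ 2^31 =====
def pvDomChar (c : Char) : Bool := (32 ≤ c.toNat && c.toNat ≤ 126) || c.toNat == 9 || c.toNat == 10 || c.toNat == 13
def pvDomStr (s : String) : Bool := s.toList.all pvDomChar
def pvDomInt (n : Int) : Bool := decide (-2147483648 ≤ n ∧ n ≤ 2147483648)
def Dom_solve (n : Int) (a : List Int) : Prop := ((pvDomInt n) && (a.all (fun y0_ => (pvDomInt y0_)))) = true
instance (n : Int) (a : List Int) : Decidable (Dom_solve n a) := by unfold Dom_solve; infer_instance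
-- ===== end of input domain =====

-- B never sorts: it simulates the game turn by turn, each turn extracting the maximum of a pool
-- (max + remove) with a toggling turn flag, keeping Alice's and Bob's scores separately.
-- A sorts `a` in place and B does not mutate it: the equivalence proved here is about the
-- return value only.

-- ===== PORT A =====
def solve (n : Int) (a : List Int) : String :=
  let s := PySem.List.sorted a (fun x => x) true
  let winner := (PySem.List.pyRange 0 n 1).foldl (fun w i =>
    let ai := PySem.List.pyGetD s i 0
    if PySem.Int.mod ai 2 = 0 ∧ PySem.Int.mod i 2 = 0 then w + ai
    else if PySem.Int.mod ai 2 = 1 ∧ PySem.Int.mod i 2 = 1 then w - ai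
    else w) 0
  if winner > 0 then "Alice"
  else if winner < 0 then "Bob"
  else "Tie"

-- ===== PORT B =====
-- the `for _ in range(n):` loop of Source B, one turn per step; `none` branches are where Python raises
def solveBLoop : Nat → List Int → Bool → Int → Int → Int × Int
  | 0, _, _, alice, bob => (alice, bob)
  | Nat.succ k, pool, aliceTurn, alice, bob =>
      match PySem.List.max? pool (fun x => x) with
      | none => (alice, bob)            -- max([]) raises ValueError: outside Pre_
      | some x =>
        match PySem.List.remove? pool x with
        | none => (alice, bob)          -- unreachable: x ∈ pool
        | some pool' =>
          let alice' := if aliceTurn then (if PySem.Int.mod x 2 = 0 then alice + x else alice) else alice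
          let bob' := if aliceTurn then bob else (if PySem.Int.mod x 2 = 1 then bob + x else bob)
          solveBLoop k pool' (!aliceTurn) alice' bob'

def solve_alt (n : Int) (a : List Int) : String :=
  let r := solveBLoop n.toNat a true 0 0
  if r.1 > r.2 then "Alice"
  else if r.1 < r.2 then "Bob"
  else "Tie"

-- ===== PRECONDITION & SPEC =====
-- Pre_ excludes only n > len(a), where A raises IndexError (and B's max(pool) raises ValueError).
def Pre_solve (n : Int) (a : List Int) : Prop := n ≤ a.length
instance (n : Int) (a : List Int) : Decidable (Pre_solve n a) := by unfold Pre_solve; infer_instance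

def pvWitness_solve : Int × List Int := (3, [3, 2, 1])

def Spec_solve (n : Int) (a : List Int) (out : String) : Prop := out = solve_alt n a
instance (n : Int) (a : List Int) (out : String) : Decidable (Spec_solve n a out) := by unfold Spec_solve; infer_instance

-- ===== CLAIM (what is proved, stated in full; the proofs are below) =====
def Claim_equal_solve : Prop := ∀ (n : Int) (a : List Int), Dom_solve n a → Pre_solve n a → Spec_solve n a (solve n a)

-- ===== LEMMAS AND PROOFS =====

-- common structural view: the game on the first k elements of the sorted-descending list
def walk : Nat → List Int → Bool → Int → Int → Int × Int
  | 0, _, _, al, bo => (al, bo)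
  | _ + 1, [], _, al, bo => (al, bo)
  | k + 1, x :: rest, t, al, bo =>
      walk k rest (!t)
        (if t ∧ PySem.Int.mod x 2 = 0 then al + x else al)
        (if (!t) ∧ PySem.Int.mod x 2 = 1 then bo + x else bo)

theorem mod_two_cases (x : Int) : PySem.Int.mod x 2 = 0 ∨ PySem.Int.mod x 2 = 1 := by
  have h1 := PySem.Int.mod_nonneg x (b := 2) (by omega)
  have h2 := PySem.Int.mod_lt x (b := 2) (by omega)
  omega

-- B's pool loop computes the game walk on any sorted-descending rearrangement of the pool
theorem bloop_eq_walk : ∀ (k : Nat) (pool s2 : List Int) (t : Bool) (al bo : Int),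
    pool.Perm s2 → s2.Pairwise (fun x y => y ≤ x) → k ≤ s2.length →
    solveBLoop k pool t al bo = walk k s2 t al bo
  | 0, pool, s2, t, al, bo, _, _, _ => by
      cases s2 <;> rfl
  | Nat.succ k, pool, s2, t, al, bo, hperm, hpair, hk => by
      cases s2 with
      | nil => simp at hk
      | cons m rest =>
        have hm : m ∈ pool := hperm.mem_iff.2 (by simp)
        obtain ⟨r, hr⟩ : ∃ r, PySem.List.max? pool (fun x => x) = some r := by
          cases hmx : PySem.List.max? pool (fun x => x) with
          | none =>
            rw [PySem.List.max?_eq_none_iff] at hmx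
            subst hmx; simp at hm
          | some r => exact ⟨r, rfl⟩
        have hrm : r = m := by
          have hrmem : r ∈ pool := PySem.List.max?_mem hr
          have h1 : m ≤ r := PySem.List.max?_isMax hr m hm
          have h2 : r ≤ m := by
            rcases List.mem_cons.1 (hperm.mem_iff.1 hrmem) with rfl | hmem
            · exact le_refl r
            · exact (List.pairwise_cons.1 hpair).1 r hmem
          omega
        subst hrm
        have hrem : PySem.List.remove? pool r = some (pool.erase r) :=
          PySem.List.remove?_eq_some_erase pool r hm
        have hperm' : (pool.erase r).Perm rest := by
          have := hperm.erase r
          simpa using this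
        simp only [solveBLoop, hr, hrem, walk]
        rw [bloop_eq_walk k (pool.erase r) rest (!t) _ _ hperm'
          (List.pairwise_cons.1 hpair).2 (by simpa using Nat.succ_le_succ_iff.1 hk)]
        congr 1
        · cases t <;> simp
        · cases t <;> simp

-- accumulator shift for walk
theorem walk_shift : ∀ (k : Nat) (b : List Int) (t : Bool) (al bo : Int),
    walk k b t al bo = (al + (walk k b t 0 0).1, bo + (walk k b t 0 0).2)
  | 0, b, t, al, bo => by cases b <;> simp [walk]
  | k + 1, [], t, al, bo => by simp [walk]
  | k + 1, x :: rest, t, al, bo => by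
      simp only [walk]
      rw [walk_shift k rest (!t), walk_shift k rest (!t)
        (if t ∧ PySem.Int.mod x 2 = 0 then 0 + x else 0)
        (if (!t) ∧ PySem.Int.mod x 2 = 1 then 0 + x else 0)]
      split_ifs <;> simp only [Prod.mk.injEq] <;> constructor <;> ring

-- A's loop body over (index, element) pairs
def aStep (w : Int) (p : Int × Int) : Int :=
  if PySem.Int.mod p.2 2 = 0 ∧ PySem.Int.mod p.1 2 = 0 then w + p.2
  else if PySem.Int.mod p.2 2 = 1 ∧ PySem.Int.mod p.1 2 = 1 then w - p.2
  else w

theorem mod_two_natCast (k : Nat) : PySem.Int.mod (k : Int) 2 = ((k % 2 : Nat) : Int) := by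
  rw [PySem.Int.mod_eq_emod_of_pos (by omega : (0:Int) < 2)]
  omega

-- A's fold of aStep over the enumerated first k elements equals the walk with the matching turn flag
theorem enum_fold_eq : ∀ (b : List Int) (k : Nat) (m : Nat) (w : Int), k ≤ b.length →
    (PySem.List.enumerate (b.take k) (m : Int)).foldl aStep w
      = w + (walk k b (decide (m % 2 = 0)) 0 0).1 - (walk k b (decide (m % 2 = 0)) 0 0).2
  | b, 0, m, w, hk => by cases b <;> simp [walk, PySem.List.enumerate_nil]
  | [], k + 1, m, w, hk => by simp at hk
  | x :: rest, k + 1, m, w, hk => by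
      simp only [List.take_succ_cons, PySem.List.enumerate_cons, List.foldl_cons]
      have hstep : ((m : Int) + 1) = ((m + 1 : Nat) : Int) := by push_cast; ring
      rw [hstep, enum_fold_eq rest k (m + 1) _ (by simpa using Nat.succ_le_succ_iff.1 hk)]
      simp only [walk]
      have htog : decide ((m + 1) % 2 = 0) = !decide (m % 2 = 0) := by
        rcases Nat.mod_two_eq_zero_or_one m with h | h <;> simp [Nat.add_mod, h]
      rw [htog]
      rw [walk_shift k rest (!decide (m % 2 = 0))
        (if decide (m % 2 = 0) ∧ PySem.Int.mod x 2 = 0 then 0 + x else 0)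
        (if (!decide (m % 2 = 0)) ∧ PySem.Int.mod x 2 = 1 then 0 + x else 0)]
      have hmx : PySem.Int.mod (m : Int) 2 = ((m % 2 : Nat) : Int) := mod_two_natCast m
      rcases Nat.mod_two_eq_zero_or_one m with hm2 | hm2 <;>
        rcases mod_two_cases x with hx | hx <;>
        simp only [aStep, hx, hmx, hm2] <;> norm_num <;> ring

-- walk only looks at the first k elements
theorem walk_take : ∀ (k : Nat) (b : List Int) (t : Bool) (al bo : Int),
    walk k (b.take k) t al bo = walk k b t al bo
  | 0, b, t, al, bo => by cases b <;> rfl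
  | k + 1, [], t, al, bo => rfl
  | k + 1, x :: rest, t, al, bo => by
      simp only [List.take_succ_cons, walk]
      exact walk_take k rest (!t) _ _

-- ===== VERDICT (by name: the statement is the Claim_ definition above) =====
theorem solve_spec : Claim_equal_solve := by
  intro n a _ hpre
  unfold Pre_solve at hpre
  unfold Spec_solve
  simp only [solve, solve_alt]
  set s := PySem.List.sorted a (fun x => x) true with hs
  have hlen : s.length = a.length := by simp [hs, PySem.List.length_sorted]
  have hperm : a.Perm s := (PySem.List.sorted_perm a (fun x => x) true).symm
  have hpair : s.Pairwise (fun x y => y ≤ x) :=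
    PySem.List.sorted_pairwise_rev a (fun x => x)
  have hklen : n.toNat ≤ s.length := by omega
  rw [bloop_eq_walk n.toNat a s true 0 0 hperm hpair hklen]
  by_cases hn0 : 0 ≤ n
  · set tl := s.take n.toNat with ht
    have hlt : tl.length = n.toNat := by
      simp [ht, List.length_take]; omega
    have hfold : (PySem.List.pyRange 0 n 1).foldl (fun w i =>
        let ai := PySem.List.pyGetD s i 0
        if PySem.Int.mod ai 2 = 0 ∧ PySem.Int.mod i 2 = 0 then w + ai
        else if PySem.Int.mod ai 2 = 1 ∧ PySem.Int.mod i 2 = 1 then w - ai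
        else w) 0 = (PySem.List.enumerate tl 0).foldl aStep 0 := by
      rw [PySem.List.enumerate_eq_map_pyRange (d := 0), List.foldl_map]
      rw [PySem.List.len_eq, hlt]
      have hnn : ((n.toNat : Int)) = n := by omega
      rw [hnn]
      apply PySem.List.foldl_congr_mem
      intro w i hi
      rw [PySem.List.mem_pyRange_one] at hi
      have hget : PySem.List.pyGetD s i 0 = PySem.List.pyGetD tl i 0 := by
        have h1 : PySem.List.pyGetD s i 0 = s[i.toNat] :=
          PySem.List.pyGetD_eq_getElem s 0 hi.1 (by simp only [hlen]; omega)
        have h2 : PySem.List.pyGetD tl i 0 = tl[i.toNat]'(by rw [hlt]; omega) :=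
          PySem.List.pyGetD_eq_getElem tl 0 hi.1 (by rw [hlt]; omega)
        rw [h1, h2]
        simp [ht, List.getElem_take]
      simp only [aStep, hget]
    rw [hfold]
    have h2 := enum_fold_eq tl n.toNat 0 0 (by omega)
    rw [List.take_of_length_le (by omega)] at h2
    have hwt : walk n.toNat tl true 0 0 = walk n.toNat s true 0 0 := by
      rw [ht]; exact walk_take n.toNat s true 0 0
    norm_num at h2
    rw [hwt] at h2
    rw [h2]
    rcases lt_trichotomy (walk n.toNat s true 0 0).1 (walk n.toNat s true 0 0).2
      with h | h | h <;> simp_all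
  · rw [PySem.List.pyRange_one_eq_nil (by omega)]
    have hw : n.toNat = 0 := by omega
    rw [hw]
    cases s <;> simp [walk]
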